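-- pv_equiv track=rewrite | github.com/LEEHYUNDONG/codingTest | codingTest_python/hackerrank/weightedUni.py | weightedUniformStrings
-- ===== SOURCE A (Python) =====
-- def weightedUniformStrings(s, queries):
--     # Write your code here
--     ans = []
--     alphaDic = dict()
--     l = 1
--     board = set()
--     for i in range(26):
--         alphaDic[chr(i+ord('a'))] = i+1
--
--     for i in range(len(s)):
--         score = alphaDic[s[i]]
--         if i+1 != len(s) and s[i+1] == s[i]:
--             l += 1
--         else:
--             l = 1
--         board.add(score*l)
--     for i in queries:
--         if i in board:
--             ans.append("Yes")
--         else: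
--             ans.append("No")
--     return ans
-- ===== SOURCE B (Python) =====
-- def weightedUniformStrings(s, queries):
--     weights = {chr(ord('a') + i): i + 1 for i in range(26)}
--     board = set()
--     n = len(s)
--     i = 0
--     while i < n:
--         j = i
--         while j < n and s[j] == s[i]:
--             j += 1
--         w = weights[s[i]]
--         for k in range(1, j - i + 1):
--             board.add(w * k)
--         i = j
--     return ["Yes" if q in board else "No" for q in queries]
-- ===== Notes on version B (the rewrite author's own statement) =====
-- stated objective: simpler
-- what changed: B splits s into maximal runs of equal characters with an explicit two-pointer run scan and inserts w*1..w*L per run, instead of A's per-index loop that threads a lookahead-updated run counter; answers become a comprehension over queries.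
import Mathlib
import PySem

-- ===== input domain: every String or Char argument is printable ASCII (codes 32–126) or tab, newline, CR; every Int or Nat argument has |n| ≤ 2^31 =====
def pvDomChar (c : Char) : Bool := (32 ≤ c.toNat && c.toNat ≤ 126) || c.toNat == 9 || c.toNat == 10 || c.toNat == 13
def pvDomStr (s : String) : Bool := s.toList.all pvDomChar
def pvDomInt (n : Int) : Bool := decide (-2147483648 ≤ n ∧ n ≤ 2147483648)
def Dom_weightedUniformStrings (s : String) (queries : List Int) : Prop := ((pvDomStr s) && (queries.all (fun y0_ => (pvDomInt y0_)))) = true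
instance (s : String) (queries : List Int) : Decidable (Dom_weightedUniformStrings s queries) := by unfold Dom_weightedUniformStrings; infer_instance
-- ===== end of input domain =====

-- B replaces A's per-index loop with lookahead-updated run counter by an explicit
-- maximal-run scan inserting w*1..w*L per run (objective: simpler).

-- ===== PORT A =====
-- alphaDic built by A's loop 'for i in range(26): alphaDic[chr(i+ord('a'))] = i+1'
def alphaDicA : PySem.Dict Char Int :=
  (List.range 26).foldl (fun d i => d.insert (Char.ofNat (i + 97)) ((i : Int) + 1)) PySem.Dict.empty

-- A's loop over i in range(len(s)) with the lookahead s[i+1], as structural recursion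
-- over the character list with the same state (l, board).  'score = alphaDic[s[i]]'
-- raises KeyError for non-lowercase chars — excluded by Pre_; getD 0 is never hit there.
def loopA (l : Int) (board : PySem.Set Int) : List Char → PySem.Set Int
  | [] => board
  | c :: rest =>
    let score := alphaDicA.getD c 0
    let l' := match rest with
      | c' :: _ => if c' == c then l + 1 else 1
      | [] => 1
    loopA l' (board.add (score * l')) rest

def weightedUniformStrings (s : String) (queries : List Int) : List String :=
  let board := loopA 1 PySem.Set.empty s.toList
  queries.foldl (fun ans i => ans ++ [if PySem.Set.contains board i then "Yes" else "No"]) []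

-- ===== PORT B =====
def weightsB : PySem.Dict Char Int :=
  (List.range 26).foldl (fun d i => d.insert (Char.ofNat (97 + i)) ((i : Int) + 1)) PySem.Dict.empty

-- Source B's two-pointer while loops: split off the maximal run at the front, recurse on the rest
def runsB : List Char → List (Char × Nat)
  | [] => []
  | c :: rest =>
    let p := rest.span (· == c)
    (c, p.1.length + 1) :: runsB p.2
termination_by cs => cs.length
decreasing_by
  simp only [List.span_eq_takeWhile_dropWhile, List.length_cons]
  exact Nat.lt_succ_of_le (List.length_dropWhile_le _ _)

def boardB (runs : List (Char × Nat)) : PySem.Set Int :=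
  runs.foldl
    (fun bd p =>
      (PySem.List.pyRange 1 ((p.2 : Int) + 1) 1).foldl
        (fun b k => b.add (weightsB.getD p.1 0 * k)) bd)
    PySem.Set.empty

def weightedUniformStrings_alt (s : String) (queries : List Int) : List String :=
  let board := boardB (runsB s.toList)
  queries.map (fun q => if PySem.Set.contains board q then "Yes" else "No")

-- ===== PRECONDITION & SPEC =====
-- Pre_ excludes strings with a character outside 'a'..'z': there Python A raises KeyError.
def Pre_weightedUniformStrings (s : String) (queries : List Int) : Prop :=
  (s.toList.all (fun c => 97 ≤ c.toNat && c.toNat ≤ 122)) = true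
instance (s : String) (queries : List Int) : Decidable (Pre_weightedUniformStrings s queries) := by
  unfold Pre_weightedUniformStrings; infer_instance

def pvWitness_weightedUniformStrings : String × List Int := ("abccddde", [1, 3, 12, 5, 9])

def Spec_weightedUniformStrings (s : String) (queries : List Int) (out : List String) : Prop := out = weightedUniformStrings_alt s queries
instance (s : String) (queries : List Int) (out : List String) : Decidable (Spec_weightedUniformStrings s queries out) := by unfold Spec_weightedUniformStrings; infer_instance

-- ===== CLAIM (what is proved, stated in full; the proofs are below) =====
def Claim_equal_weightedUniformStrings : Prop := ∀ (s : String) (queries : List Int), Dom_weightedUniformStrings s queries → Pre_weightedUniformStrings s queries → Spec_weightedUniformStrings s queries (weightedUniformStrings s queries)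

-- ===== LEMMAS AND PROOFS =====

-- the two ports build the same alphabet weights
theorem weights_eq : alphaDicA = weightsB := by decide

-- the board argument of loopA only ever grows; membership splits off
theorem mem_loopA_board (cs : List Char) (l : Int) (b : PySem.Set Int) (x : Int) :
    x ∈ loopA l b cs ↔ x ∈ b ∨ x ∈ loopA l PySem.Set.empty cs := by
  induction cs generalizing l b with
  | nil => simp [loopA, PySem.Set.empty]
  | cons c rest ih =>
    simp only [loopA]
    rw [ih, ih (b := (PySem.Set.empty).add _)]
    simp [PySem.Set.mem_add, PySem.Set.empty]
    tauto

-- one-step unfoldings of A's loop, by the lookahead test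
theorem loopA_cons_eq (c : Char) (rest : List Char) (h : rest.head? = some c)
    (l : Int) (b : PySem.Set Int) :
    loopA l b (c :: rest) = loopA (l + 1) (b.add (alphaDicA.getD c 0 * (l + 1))) rest := by
  cases rest with
  | nil => simp at h
  | cons d t => simp at h; simp [loopA, h]

theorem loopA_cons_ne (c : Char) (rest : List Char)
    (h : ∀ d, rest.head? = some d → (d == c) = false)
    (l : Int) (b : PySem.Set Int) :
    loopA l b (c :: rest) = loopA 1 (b.add (alphaDicA.getD c 0 * 1)) rest := by
  cases rest with
  | nil => simp [loopA]
  | cons d t => simp [loopA, h d rfl]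

-- one maximal run: processing c :: c^m ++ post with incoming counter l adds
-- w*(l+1) … w*(l+m) and w*1, then restarts at l = 1 on post
theorem mem_loopA_run (c : Char) (m : Nat) (post : List Char)
    (hpost : ∀ d, post.head? = some d → (d == c) = false) :
    ∀ (l : Int) (b : PySem.Set Int) (x : Int),
    x ∈ loopA l b (c :: (List.replicate m c ++ post)) ↔
      x ∈ b ∨ (∃ i : Nat, 1 ≤ i ∧ i ≤ m ∧ x = alphaDicA.getD c 0 * (l + i)) ∨
      x = alphaDicA.getD c 0 ∨ x ∈ loopA 1 PySem.Set.empty post := by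
  induction m with
  | zero =>
    intro l b x
    simp only [List.replicate_zero, List.nil_append]
    rw [loopA_cons_ne c post hpost, mem_loopA_board]
    simp [PySem.Set.mem_add, PySem.Set.empty]
    tauto
  | succ m ih =>
    intro l b x
    simp only [List.replicate_succ]
    rw [List.cons_append]
    rw [loopA_cons_eq c _ (by simp) l b, ih (l + 1)]
    simp only [PySem.Set.mem_add]
    constructor
    · rintro ((h | h) | ⟨i, h1, h2, h3⟩ | h | h)
      · exact Or.inl h
      · exact Or.inr (Or.inl ⟨1, by omega, by omega, by rw [h]; norm_num⟩)
      · exact Or.inr (Or.inl ⟨i + 1, by omega, by omega, by rw [h3]; push_cast; ring⟩)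
      · exact Or.inr (Or.inr (Or.inl h))
      · exact Or.inr (Or.inr (Or.inr h))
    · rintro (h | ⟨i, h1, h2, h3⟩ | h | h)
      · exact Or.inl (Or.inl h)
      · rcases Nat.eq_or_lt_of_le h1 with he | hlt
        · exact Or.inl (Or.inr (by rw [h3, ← he]; push_cast; ring_nf))
        · exact Or.inr (Or.inl ⟨i - 1, by omega, by omega, by
            rw [h3]; congr 1; push_cast [Nat.cast_sub (by omega : 1 ≤ i)]; ring⟩)
      · exact Or.inr (Or.inr (Or.inl h))
      · exact Or.inr (Or.inr (Or.inr h))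

-- characterisation of A's board via B's run decomposition
theorem mem_loopA_runs (cs : List Char) (x : Int) :
    x ∈ loopA 1 PySem.Set.empty cs ↔
      ∃ p ∈ runsB cs, ∃ k : Int, 1 ≤ k ∧ k ≤ (p.2 : Int) ∧ x = alphaDicA.getD p.1 0 * k := by
  induction hn : cs.length using Nat.strong_induction_on generalizing cs with
  | _ n ih =>
  cases cs with
  | nil => simp [loopA, runsB, PySem.Set.empty]
  | cons c rest =>
    have hrepl : rest.takeWhile (· == c) = List.replicate (rest.takeWhile (· == c)).length c := by
      apply List.eq_replicate_of_mem
      intro d hd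
      have := List.mem_takeWhile_imp hd
      simpa using this
    have hpost : ∀ d, (rest.dropWhile (· == c)).head? = some d → (d == c) = false := by
      intro d hd
      have := List.head?_dropWhile_not (· == c) rest
      rw [hd] at this
      simpa using this
    have hsplit : c :: rest = c :: (List.replicate (rest.takeWhile (· == c)).length c ++ rest.dropWhile (· == c)) := by
      conv_lhs => rw [← List.takeWhile_append_dropWhile (p := (· == c)) (l := rest)]
      rw [← hrepl]
    rw [hsplit, mem_loopA_run c _ _ hpost 1 PySem.Set.empty x]
    rw [← hsplit]
    have hlen : (rest.dropWhile (· == c)).length < n := by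
      have := List.length_dropWhile_le (· == c) rest
      simp at hn; omega
    rw [ih _ hlen _ rfl]
    have hruns : runsB (c :: rest) = (c, (rest.takeWhile (· == c)).length + 1) :: runsB (rest.dropWhile (· == c)) := by
      rw [runsB]
      simp [List.span_eq_takeWhile_dropWhile]
    rw [hruns]
    simp only [PySem.Set.empty, List.not_mem_nil, false_or, List.mem_cons]
    constructor
    · rintro (⟨i, h1, h2, h3⟩ | h | ⟨p, hp, k, hk1, hk2, hk3⟩)
      · exact ⟨_, Or.inl rfl, 1 + i, by omega, by push_cast; omega, h3⟩
      · exact ⟨_, Or.inl rfl, 1, by omega, by push_cast; omega, by rw [h]; ring⟩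
      · exact ⟨p, Or.inr hp, k, hk1, hk2, hk3⟩
    · rintro ⟨p, hp | hp, k, hk1, hk2, hk3⟩
      · subst hp
        rcases eq_or_lt_of_le hk1 with he | hlt
        · exact Or.inr (Or.inl (by rw [hk3, ← he]; ring))
        · refine Or.inl ⟨(k - 1).toNat, by omega, by omega, ?_⟩
          rw [hk3]; congr 1; omega
      · exact Or.inr (Or.inr ⟨p, hp, k, hk1, hk2, hk3⟩)

-- characterisation of B's board
theorem mem_boardB (runs : List (Char × Nat)) (x : Int) :
    x ∈ boardB runs ↔
      ∃ p ∈ runs, ∃ k : Int, 1 ≤ k ∧ k ≤ (p.2 : Int) ∧ x = weightsB.getD p.1 0 * k := by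
  suffices h : ∀ (b : PySem.Set Int),
      x ∈ runs.foldl (fun bd p => (PySem.List.pyRange 1 ((p.2 : Int) + 1) 1).foldl
        (fun b k => b.add (weightsB.getD p.1 0 * k)) bd) b ↔
      x ∈ b ∨ ∃ p ∈ runs, ∃ k : Int, 1 ≤ k ∧ k ≤ (p.2 : Int) ∧ x = weightsB.getD p.1 0 * k by
    rw [boardB, h]
    simp [PySem.Set.empty]
  induction runs with
  | nil => simp
  | cons p rest ih =>
    intro b
    simp only [List.foldl_cons]
    rw [ih]
    rw [PySem.Set.mem_foldl_add]
    constructor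
    · rintro ((h | ⟨k, hk, he⟩) | ⟨q, hq, k, h1, h2, h3⟩)
      · exact Or.inl h
      · rw [PySem.List.mem_pyRange_one] at hk
        exact Or.inr ⟨p, List.mem_cons_self .., k, hk.1, by omega, he⟩
      · exact Or.inr ⟨q, List.mem_cons_of_mem _ hq, k, h1, h2, h3⟩
    · rintro (h | ⟨q, hq, k, h1, h2, h3⟩)
      · exact Or.inl (Or.inl h)
      · rcases List.mem_cons.mp hq with he | hq'
        · subst he
          exact Or.inl (Or.inr ⟨k, PySem.List.mem_pyRange_one.mpr ⟨h1, by omega⟩, h3⟩)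
        · exact Or.inr ⟨q, hq', k, h1, h2, h3⟩

theorem contains_eq (cs : List Char) (q : Int) :
    PySem.Set.contains (loopA 1 PySem.Set.empty cs) q
      = PySem.Set.contains (boardB (runsB cs)) q := by
  apply Bool.eq_iff_iff.mpr
  rw [PySem.Set.contains_iff, PySem.Set.contains_iff,
      mem_loopA_runs, weights_eq, ← mem_boardB]

-- ===== VERDICT (by name: the statement is the Claim_ definition above) =====
theorem weightedUniformStrings_spec : Claim_equal_weightedUniformStrings := by
  intro s queries _ _
  unfold Spec_weightedUniformStrings weightedUniformStrings weightedUniformStrings_alt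
  rw [PySem.List.foldl_append_singleton_eq_map]
  simp only [contains_eq, List.nil_append]
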